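-- pv_equiv track=rewrite | github.com/posl/comment_recommendation | script/mod_gen/2_time/zh/279_A/9.py | count
-- ===== SOURCE A (Python) =====
-- def count(s):
--     count = 0
--     for i in range(len(s)):
--         if s[i] == 'w':
--             for j in range(i+1,len(s)):
--                 if s[j] == 'w':
--                     count += 1
--     return count
-- ===== SOURCE B (Python) =====
-- def count(s):
--     k = 0
--     for c in s:
--         if c == 'w':
--             k += 1
--     return k * (k - 1) // 2
-- ===== Notes on version B (the rewrite author's own statement) =====
-- stated objective: faster
-- what changed: replaces the quadratic nested scan over index pairs by a single pass that counts the target letter (k occurrences) and returns the closed form k*(k-1)//2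
import Mathlib
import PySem

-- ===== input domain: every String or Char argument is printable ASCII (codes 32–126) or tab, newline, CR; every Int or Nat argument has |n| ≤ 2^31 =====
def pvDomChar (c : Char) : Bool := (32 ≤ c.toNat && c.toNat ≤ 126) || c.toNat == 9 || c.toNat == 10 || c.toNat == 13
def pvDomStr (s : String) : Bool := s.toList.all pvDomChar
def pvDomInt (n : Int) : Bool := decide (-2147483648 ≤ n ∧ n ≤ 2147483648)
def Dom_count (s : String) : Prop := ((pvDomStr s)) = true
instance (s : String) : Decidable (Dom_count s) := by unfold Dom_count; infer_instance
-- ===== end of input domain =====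

-- B replaces A's quadratic nested index scan by one pass counting the target letter (k occurrences) and the closed form k*(k-1)//2 (faster).

-- ===== PORT A =====
def count (s : String) : Int :=
  let cs := s.toList
  let n : Int := (cs.length : Int)
  (PySem.List.pyRange 0 n 1).foldl (fun c i =>
    if PySem.List.pyGetD cs i ' ' = 'w' then
      (PySem.List.pyRange (i + 1) n 1).foldl (fun c2 j =>
        if PySem.List.pyGetD cs j ' ' = 'w' then c2 + 1 else c2) c
    else c) 0

-- ===== PORT B =====
def count_alt (s : String) : Int :=
  let k : Int := s.toList.foldl (fun k c => if c = 'w' then k + 1 else k) 0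
  PySem.Int.floordiv (k * (k - 1)) 2

-- ===== PRECONDITION & SPEC =====
def Spec_count (s : String) (out : Int) : Prop := out = count_alt s
instance (s : String) (out : Int) : Decidable (Spec_count s out) := by unfold Spec_count; infer_instance

-- ===== CLAIM (what is proved, stated in full; the proofs are below) =====
def Claim_equal_count : Prop := ∀ (s : String), Dom_count s → Spec_count s (count s)

-- ===== LEMMAS AND PROOFS =====

-- the list-level sum A's nested loops compute: for each index i holding 'w', the number of 'w' after it
def pvSum (cs : List Char) : Int :=
  ((List.range cs.length).map (fun i =>
    if cs.getD i ' ' = 'w' then ((cs.drop (i + 1)).count 'w' : Int) else 0)).sum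

theorem pvSum_cons (x : Char) (l : List Char) :
    pvSum (x :: l) = (if x = 'w' then (l.count 'w' : Int) else 0) + pvSum l := by
  simp only [pvSum, List.length_cons, List.range_succ_eq_map, List.map_cons, List.map_map,
    List.sum_cons]
  have h2 : ∀ i ∈ List.range l.length,
      ((fun i => if (x :: l).getD i ' ' = 'w' then ((List.count 'w' (List.drop (i + 1) (x :: l))) : Int) else 0) ∘ Nat.succ) i
      = (fun i => if l.getD i ' ' = 'w' then ((List.count 'w' (List.drop (i + 1) l)) : Int) else 0) i := by
    intro i _
    simp [Function.comp, List.getD]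
  rw [List.map_congr_left h2]
  simp [List.getD]

theorem two_mul_pvSum (cs : List Char) :
    2 * pvSum cs = (cs.count 'w' : Int) * ((cs.count 'w' : Int) - 1) := by
  induction cs with
  | nil => simp [pvSum]
  | cons x l ih =>
    rw [pvSum_cons, List.count_cons]
    by_cases h : x = 'w' <;> simp [h] <;> nlinarith [ih]

theorem count_eq_pvSum (s : String) : count s = pvSum s.toList := by
  simp only [count]
  set cs := s.toList with hcs
  rw [PySem.List.pyRange_one]
  simp only [sub_zero, Int.toNat_natCast]
  rw [List.foldl_map]
  rw [PySem.List.foldl_congr_mem' (List.range cs.length) _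
    (fun (c : Int) (k : Nat) =>
      c + (if cs.getD k ' ' = 'w' then ((cs.drop (k + 1)).count 'w' : Int) else 0)) 0 ?_]
  · rw [PySem.List.foldl_add]
    simp [pvSum]
  · intro k _ c
    simp only [zero_add, PySem.List.pyGetD_natCast]
    by_cases h : cs.getD k ' ' = 'w'
    · simp only [h, if_true]
      rw [PySem.List.foldl_pyRange_pyGetD' cs ' '
        (fun (c2 : Int) (x : Char) => if x = 'w' then c2 + 1 else c2) c (by positivity)]
      rw [PySem.List.foldl_ite_add_one]
      have h1 : ((k : Int) + 1).toNat = k + 1 := by omega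
      rw [h1]
      simp [List.count_eq_countP]
      apply List.countP_congr
      intro x _
      simp
    · simp only [List.getD] at h
      simp [h]

theorem count_alt_eq (s : String) :
    count_alt s = PySem.Int.floordiv ((s.toList.count 'w' : Int) * ((s.toList.count 'w' : Int) - 1)) 2 := by
  simp only [count_alt]
  rw [PySem.List.foldl_ite_add_one]
  congr 2 <;>
  · simp [List.count_eq_countP]
    apply List.countP_congr
    intro x _
    simp

-- ===== VERDICT (by name: the statement is the Claim_ definition above) =====
theorem count_spec : Claim_equal_count := by
  intro s _
  unfold Spec_count
  rw [count_alt_eq, count_eq_pvSum, ← two_mul_pvSum]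
  rw [PySem.Int.floordiv_eq_ediv_of_pos (by norm_num)]
  omega
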